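-- pv_equiv track=rewrite | github.com/joonion/boj | Chap.22.스택/17608.막대기/solve.py | solve
-- ===== SOURCE A (Python) =====
-- def solve(n, A):
--     stack = []
--     for i in range(n):
--         while len(stack) != 0 and stack[-1] <= A[i]:
--             if (len(stack) > 0):
--                 stack.pop()
--         stack.append(A[i])
--     return len(stack)
-- ===== SOURCE B (Python) =====
-- def solve(n, A):
--     cnt = 0
--     mx = None
--     for i in range(n - 1, -1, -1):
--         if mx is None or A[i] > mx:
--             cnt += 1
--             mx = A[i]
--     return cnt
-- ===== Notes on version B (the rewrite author's own statement) =====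
-- stated objective: simpler
-- what changed: Replaces the stack with a right-to-left scan that keeps only a running maximum and a counter, counting bars strictly taller than everything to their right.
import Mathlib
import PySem

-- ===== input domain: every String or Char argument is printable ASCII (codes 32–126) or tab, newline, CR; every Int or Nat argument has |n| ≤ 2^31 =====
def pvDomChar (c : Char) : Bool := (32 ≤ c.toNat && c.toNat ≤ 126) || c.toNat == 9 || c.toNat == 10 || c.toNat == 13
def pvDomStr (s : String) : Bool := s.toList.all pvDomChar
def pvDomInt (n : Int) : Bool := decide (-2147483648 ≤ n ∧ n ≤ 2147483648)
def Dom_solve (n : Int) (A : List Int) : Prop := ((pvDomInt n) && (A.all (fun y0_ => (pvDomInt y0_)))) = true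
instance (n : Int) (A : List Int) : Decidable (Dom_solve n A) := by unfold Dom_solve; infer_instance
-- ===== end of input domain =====

-- B replaces A's explicit stack by a right-to-left scan keeping a running maximum and a counter (simpler, same O(n) cost).


-- ===== PORT A =====
-- the Python while-pop loop; the stack is represented top-first (head = Python stack[-1])
def popLoop (x : Int) : List Int → List Int
  | [] => []
  | t :: s => if t ≤ x then popLoop x s else t :: s

def solve (n : Int) (A : List Int) : Int :=
  ((PySem.List.pyRange 0 n 1).foldl
    (fun stack i => PySem.List.pyGetD A i 0 :: popLoop (PySem.List.pyGetD A i 0) stack)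
    []).length

-- ===== PORT B =====
def solve_alt (n : Int) (A : List Int) : Int :=
  ((PySem.List.pyRange (n - 1) (-1) (-1)).foldl
    (fun st i =>
      match st.2 with
      | none => (st.1 + 1, some (PySem.List.pyGetD A i 0))
      | some v =>
        if v < PySem.List.pyGetD A i 0 then (st.1 + 1, some (PySem.List.pyGetD A i 0)) else st)
    ((0 : Int), (none : Option Int))).1

-- ===== PRECONDITION & SPEC =====
-- A raises IndexError (A[i]) as soon as n exceeds len(A); exactly those inputs are excluded.
def Pre_solve (n : Int) (A : List Int) : Prop := n ≤ (A.length : Int)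
instance (n : Int) (A : List Int) : Decidable (Pre_solve n A) := by unfold Pre_solve; infer_instance
def pvWitness_solve : Int × List Int := (4, [3, 5, 5, 2])

def Spec_solve (n : Int) (A : List Int) (out : Int) : Prop := out = solve_alt n A
instance (n : Int) (A : List Int) (out : Int) : Decidable (Spec_solve n A out) := by unfold Spec_solve; infer_instance

-- ===== CLAIM (what is proved, stated in full; the proofs are below) =====
def Claim_equal_solve : Prop := ∀ (n : Int) (A : List Int), Dom_solve n A → Pre_solve n A → Spec_solve n A (solve n A)

-- ===== LEMMAS AND PROOFS =====

-- A's stack computed by structural recursion on the (reversed) processed prefix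
def stackOf : List Int → List Int
  | [] => []
  | y :: t => y :: popLoop y (stackOf t)

-- B's count computed by structural recursion with a running maximum
def recAux : Option Int → List Int → Int
  | _, [] => 0
  | none, y :: t => 1 + recAux (some y) t
  | some v, y :: t => if v < y then 1 + recAux (some y) t else recAux (some v) t

theorem popLoop_eq_filter (y : Int) (s : List Int) (hs : List.Sorted (· < ·) s) :
    popLoop y s = s.filter (fun x => y < x) := by
  induction s with
  | nil => rfl
  | cons a t ih =>
    rw [List.sorted_cons] at hs
    by_cases h : a ≤ y
    · simp [popLoop, h, ih hs.2, show ¬ (y < a) by omega]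
    · have : t.filter (fun x => y < x) = t := by
        apply List.filter_eq_self.2
        intro x hx
        have := hs.1 x hx
        simp; omega
      simp [popLoop, h, this, show y < a by omega]

theorem sorted_stackOf (r : List Int) : List.Sorted (· < ·) (stackOf r) := by
  induction r with
  | nil => exact List.Pairwise.nil
  | cons y t ih =>
    rw [stackOf, popLoop_eq_filter y _ ih, List.sorted_cons]
    exact ⟨fun x hx => (by simpa using (List.mem_filter.1 hx).2),
           ih.filter _⟩

theorem filter_stackOf_some (r : List Int) :
    ∀ m : Int, (( (stackOf r).filter (fun x => m < x)).length : Int) = recAux (some m) r := by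
  induction r with
  | nil => intro m; rfl
  | cons y t ih =>
    intro m
    rw [stackOf, popLoop_eq_filter y _ (sorted_stackOf t)]
    by_cases h : m < y
    · have hp : ∀ x : Int, ((fun x => decide (m < x)) x && (fun x => decide (y < x)) x)
          = (fun x => decide (y < x)) x := by
        intro x
        by_cases hx : y < x
        · simp [hx, show m < x by omega]
        · simp [hx]
      simp only [List.filter_cons, decide_eq_true_eq, h, if_pos, List.length_cons,
        List.filter_filter]
      simp only [hp]
      rw [recAux, if_pos h, ← ih y]
      push_cast; ring
    · have hp : ∀ x : Int, ((fun x => decide (m < x)) x && (fun x => decide (y < x)) x)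
          = (fun x => decide (m < x)) x := by
        intro x
        by_cases hx : m < x
        · simp [hx, show y < x by omega]
        · simp [hx]
      simp only [List.filter_cons, decide_eq_true_eq, h, if_neg, List.filter_filter,
        not_false_eq_true]
      simp only [hp]
      rw [recAux, if_neg h, ← ih m]
  
theorem length_stackOf (r : List Int) : ((stackOf r).length : Int) = recAux none r := by
  cases r with
  | nil => rfl
  | cons y t =>
    rw [stackOf, popLoop_eq_filter y _ (sorted_stackOf t), recAux, ← filter_stackOf_some]
    simp only [List.length_cons]
    push_cast; ring

-- A's foldl over the reversed list builds stackOf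
theorem foldl_stack_eq (r : List Int) :
    r.reverse.foldl (fun s x => x :: popLoop x s) [] = stackOf r := by
  induction r with
  | nil => rfl
  | cons y t ih => rw [List.reverse_cons, List.foldl_append, ih]; rfl

-- B's foldl computes recAux
theorem foldl_alt_eq (r : List Int) :
    ∀ (c : Int) (m : Option Int),
      (r.foldl (fun st y =>
        match st.2 with
        | none => (st.1 + 1, some y)
        | some v => if v < y then (st.1 + 1, some y) else st) (c, m)).1 = c + recAux m r := by
  induction r with
  | nil => intro c m; simp [recAux]
  | cons y t ih =>
    intro c m
    cases m with
    | none => simp only [List.foldl_cons, recAux]; rw [ih]; ring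
    | some v =>
      by_cases h : v < y <;> simp only [List.foldl_cons, recAux, h, if_pos, if_neg,
        not_false_eq_true] <;> rw [ih] <;> ring

-- the range-with-getD folds are folds over the prefix (A side) / its reverse (B side)
theorem map_getD_range (A : List Int) :
    ∀ k : Nat, k ≤ A.length →
      (PySem.List.pyRange 0 (k : Int) 1).map (fun i => PySem.List.pyGetD A i 0) = A.take k := by
  intro k
  induction k with
  | zero => intro _; simp [PySem.List.pyRange_zero_nat]
  | succ k ih =>
    intro hk
    push_cast
    have h1 : (0 : Int) ≤ (k : Int) := by positivity
    rw [PySem.List.pyRange_one_succ_right h1, List.map_append, ih (by omega)]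
    have hlt : k < A.length := by omega
    simp only [List.map_cons, List.map_nil]
    rw [PySem.List.pyGetD_natCast, List.getD_eq_getElem A 0 hlt, List.take_succ,
      List.getElem?_eq_getElem hlt]
    rfl

theorem foldl_getD_comm {β : Type} (f : β → Int → β) (A : List Int) (l : List Int) :
    ∀ init : β,
      l.foldl (fun acc i => f acc (PySem.List.pyGetD A i 0)) init
        = (l.map (fun i => PySem.List.pyGetD A i 0)).foldl f init := by
  induction l with
  | nil => intro init; rfl
  | cons a t ih => intro init; simp only [List.foldl_cons, List.map_cons, ih]

theorem solve_of_nat (k : Nat) (A : List Int) (h : (k : Int) ≤ (A.length : Int)) :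
    solve (k : Int) A = ((stackOf (A.take k).reverse).length : Int) := by
  unfold solve
  have h2 := foldl_stack_eq (A.take k).reverse
  rw [List.reverse_reverse] at h2
  rw [foldl_getD_comm (fun s x => x :: popLoop x s) A _ [],
      map_getD_range A k (by omega), h2]

theorem solve_alt_of_nat (k : Nat) (A : List Int) (h : (k : Int) ≤ (A.length : Int)) :
    solve_alt (k : Int) A = recAux none (A.take k).reverse := by
  unfold solve_alt
  rw [PySem.List.pyRange_neg_one_eq_reverse,
      show (-1 : Int) + 1 = 0 by ring, show (k : Int) - 1 + 1 = (k : Int) by ring,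
      foldl_getD_comm (fun st (y : Int) =>
          match st.2 with
          | none => (st.1 + 1, some y)
          | some v => if v < y then (st.1 + 1, some y) else st) A _ ((0 : Int), none),
      List.map_reverse, map_getD_range A k (by omega), foldl_alt_eq]
  ring

-- ===== VERDICT (by name: the statement is the Claim_ definition above) =====
theorem solve_spec : Claim_equal_solve := by
  intro n A _ hpre
  unfold Spec_solve
  by_cases hn : 0 ≤ n
  · lift n to ℕ using hn
    rw [solve_of_nat n A hpre, solve_alt_of_nat n A hpre, length_stackOf]
  · unfold solve solve_alt
    rw [PySem.List.pyRange_one_eq_nil (by omega), PySem.List.pyRange_neg_one_eq_nil (by omega)]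
    rfl
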